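-- pv_equiv track=rewrite | github.com/tarynbytes/pkt_features | merge_me/better_ml.py | Cumulative
-- ===== SOURCE A (Python) =====
-- include_zeros = False
--
-- def remove_items(test_list, item):
--     res = [i for i in test_list if i != item]
--     return res
--
-- def Cumulative(lists):
--     cu_list = []
--     key = lists[0]
--     if include_zeros:
--         length = len(lists)
--         cu_list = [sum(lists[1:x:1]) for x in range(0, length+1)]
--     else:
--         list_no_zeros = remove_items(lists, 0)
--         length = len(list_no_zeros)
--         cu_list = [sum(list_no_zeros[1:x:1]) for x in range(0, length+1)]
--     cu_list[1] = key
--     return cu_list[1:]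
-- ===== SOURCE B (Python) =====
-- def Cumulative(lists):
--     key = lists[0]
--     nz = [v for v in lists if v != 0]
--     out = [key]
--     s = 0
--     for v in nz[1:]:
--         s += v
--         out.append(s)
--     return out
-- ===== Notes on version B (the rewrite author's own statement) =====
-- stated objective: faster
-- what changed: replaces the per-index re-summation of slices (sum(list[1:x]) for every x) by one pass keeping a running sum
import Mathlib
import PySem

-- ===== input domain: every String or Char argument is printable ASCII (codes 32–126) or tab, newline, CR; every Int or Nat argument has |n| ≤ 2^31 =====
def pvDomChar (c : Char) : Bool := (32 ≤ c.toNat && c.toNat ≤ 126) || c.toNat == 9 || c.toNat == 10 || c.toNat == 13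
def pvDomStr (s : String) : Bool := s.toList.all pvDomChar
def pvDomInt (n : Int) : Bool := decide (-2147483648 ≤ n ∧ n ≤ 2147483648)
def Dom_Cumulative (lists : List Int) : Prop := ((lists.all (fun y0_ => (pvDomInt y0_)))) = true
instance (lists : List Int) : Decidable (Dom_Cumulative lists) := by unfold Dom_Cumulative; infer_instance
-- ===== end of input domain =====

-- B replaces A's quadratic re-summation of slices by a single pass with a running sum (objective: faster).

-- ===== PORT A =====
def remove_items (test_list : List Int) (item : Int) : List Int :=
  test_list.filter (fun i => i != item)

def Cumulative (lists : List Int) : List Int :=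
  -- key = lists[0]  (IndexError on [] is excluded by Pre_)
  let key := (PySem.List.pyGet? lists 0).getD 0
  -- include_zeros is False, so only the else branch is ported
  let list_no_zeros := remove_items lists 0
  let length := list_no_zeros.length
  let cu_list := (PySem.List.pyRange 0 ((length : Int) + 1) 1).map
      (fun x => (PySem.List.slice list_no_zeros (some 1) (some x)).sum)
  -- cu_list[1] = key  (IndexError when cu_list has < 2 elements is excluded by Pre_)
  let cu_list := cu_list.set 1 key
  PySem.List.slice cu_list (some 1) none

-- ===== PORT B =====
def Cumulative_alt (lists : List Int) : List Int :=
  let key := (PySem.List.pyGet? lists 0).getD 0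
  let nz := lists.filter (fun v => v != 0)
  ((PySem.List.slice nz (some 1) none).foldl
      (fun (st : Int × List Int) v => (st.1 + v, st.2 ++ [st.1 + v])) (0, [key])).2

-- ===== PRECONDITION & SPEC =====
-- Pre_ excludes exactly the inputs on which A raises IndexError: the empty list
-- (at lists[0]) and nonempty all-zero lists (at cu_list[1] = key).
def Pre_Cumulative (lists : List Int) : Prop :=
  lists ≠ [] ∧ lists.filter (fun v => v != 0) ≠ []
instance (lists : List Int) : Decidable (Pre_Cumulative lists) := by
  unfold Pre_Cumulative; infer_instance
def pvWitness_Cumulative : List Int := [5, 0, 1, 2]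

def Spec_Cumulative (lists : List Int) (out : List Int) : Prop := out = Cumulative_alt lists
instance (lists : List Int) (out : List Int) : Decidable (Spec_Cumulative lists out) := by
  unfold Spec_Cumulative; infer_instance

-- ===== CLAIM (what is proved, stated in full; the proofs are below) =====
def Claim_equal_Cumulative : Prop :=
  ∀ (lists : List Int), Dom_Cumulative lists → Pre_Cumulative lists →
    Spec_Cumulative lists (Cumulative lists)

-- ===== LEMMAS AND PROOFS =====

-- B's loop: the accumulated list is the starting list followed by running sums.
theorem foldl_running_sum (u : List Int) (s : Int) (acc : List Int) :
    (u.foldl (fun (st : Int × List Int) v => (st.1 + v, st.2 ++ [st.1 + v])) (s, acc)).2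
      = acc ++ (List.range u.length).map (fun k => s + (u.take (k + 1)).sum) := by
  induction u generalizing s acc with
  | nil => simp
  | cons v u ih =>
      simp only [List.foldl_cons, List.length_cons, List.range_succ_eq_map, List.map_cons,
        List.map_map, ih]
      simp [Function.comp, add_assoc, List.append_assoc]

theorem Cumulative_spec : Claim_equal_Cumulative := by
  intro lists _hdom hpre
  obtain ⟨hne, hnz⟩ := hpre
  unfold Spec_Cumulative Cumulative Cumulative_alt remove_items
  obtain ⟨h, rest, rfl⟩ : ∃ h rest, lists = h :: rest := by
    cases lists with
    | nil => exact absurd rfl hne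
    | cons h rest => exact ⟨h, rest, rfl⟩
  obtain ⟨t0, t, hfil⟩ : ∃ t0 t, (h :: rest).filter (fun v => v != 0) = t0 :: t := by
    cases hf : (h :: rest).filter (fun v => v != 0) with
    | nil => exact absurd hf hnz
    | cons t0 t => exact ⟨t0, t, rfl⟩
  simp only [hfil, PySem.List.slice_from_one, List.tail_cons]
  rw [foldl_running_sum]
  have hrange : PySem.List.pyRange 0 (((t0 :: t).length : Int) + 1) 1
      = (List.range ((t0 :: t).length + 1)).map (fun k => ((k : Nat) : Int)) := by
    rw [PySem.List.pyRange_one]; simp only [sub_zero, zero_add]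
    norm_cast
  rw [hrange, List.map_map]
  have hr2 : List.range ((t0 :: t).length + 1) = 0 :: 1 :: (List.range t.length).map (fun k => k + 2) := by
    simp [List.range_succ_eq_map, List.map_map, Function.comp_def]
  rw [hr2]
  simp only [List.map_cons, List.map_map, Function.comp_def]
  rw [show ∀ (a b : Int) (l : List Int) (v : Int), (a :: b :: l).set 1 v = a :: v :: l from fun _ _ _ _ => rfl]
  simp only [List.tail_cons]
  congr 1
  apply List.map_congr_left
  intro k _
  rw [PySem.List.slice_toNat _ (by norm_num) (by positivity)]
  have : ((k:Int) + 2).toNat - 1 = k + 1 := by omega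
  simp [this]
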